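-- pv_equiv track=rewrite | github.com/Gyyz/torchtune | text-to-sql-finetune/statistical.py | found_primary_key_foreign_key
-- ===== SOURCE A (Python) =====
-- from collections import Counter
-- from math import comb
--
-- def found_primary_key_foreign_key(table_names, column_names):
--     # table_names is a list of string
--     # column_names is a list of list of string
--     # assume the column name with id in it is the primary key
--     # assume the column name in different table is the foreign key
--     column_names_flatted = [col for cols in column_names for col in cols]
--     column_count = Counter(column_names_flatted)
--     foreign_keys = []
--     primary_key = []
--
--     foreign_keys_num = 0
--     for col, cnt in column_count.items():
--         if cnt > 1:
--             foreign_keys.append(col)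
--             foreign_keys_num += comb(cnt, 2)
--
--
--
--     for tab_name, col_names in zip(table_names, column_names):
--         primary_key_tmp = ''
--         for col in col_names:
--             if col.lower().endswith('id'):
--                 primary_key_tmp = col
--                 break
--         if primary_key_tmp != '':
--             primary_key.append(primary_key_tmp)
--     primary_key_num = len(primary_key)
--     return primary_key_num, foreign_keys_num
-- ===== SOURCE B (Python) =====
-- def found_primary_key_foreign_key(table_names, column_names):
--     # one streaming pass: pair-count duplicates online instead of Counter + second pass
--     seen = {}
--     foreign_keys_num = 0
--     for cols in column_names:
--         for col in cols:
--             c = seen.get(col, 0)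
--             foreign_keys_num += c
--             seen[col] = c + 1
--     primary_key_num = sum(1 for _, cols in zip(table_names, column_names)
--                           if any(col.lower().endswith('id') for col in cols))
--     return primary_key_num, foreign_keys_num
-- ===== Notes on version B (the rewrite author's own statement) =====
-- stated objective: alternative
-- what changed: B counts duplicate pairs in one streaming pass (fk += times-seen-so-far per column) instead of A's build-a-Counter-then-second-pass-with-comb(cnt,2), and counts primary keys with a direct any()-predicate over zip instead of A's find-first-then-append-then-len list building.
import Mathlib
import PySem

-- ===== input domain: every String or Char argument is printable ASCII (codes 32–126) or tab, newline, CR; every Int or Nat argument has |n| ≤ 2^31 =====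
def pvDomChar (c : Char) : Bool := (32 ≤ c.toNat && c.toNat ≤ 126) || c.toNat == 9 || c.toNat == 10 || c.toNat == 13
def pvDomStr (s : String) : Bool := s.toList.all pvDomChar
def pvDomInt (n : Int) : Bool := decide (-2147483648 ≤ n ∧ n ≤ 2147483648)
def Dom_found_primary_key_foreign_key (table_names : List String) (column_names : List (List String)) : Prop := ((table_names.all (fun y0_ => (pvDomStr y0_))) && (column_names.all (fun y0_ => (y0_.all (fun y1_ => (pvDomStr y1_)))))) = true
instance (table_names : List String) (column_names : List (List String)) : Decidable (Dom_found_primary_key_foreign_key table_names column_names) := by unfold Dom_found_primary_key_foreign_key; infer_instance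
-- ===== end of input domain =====

-- B replaces A's Counter-table-then-second-pass pair counting by a single streaming pass
-- (fk += occurrences seen so far) and A's find-first/append/len primary-key loop by a direct
-- any()-count over the zipped tables: a different decomposition of the same computation.


-- ===== PORT A =====
-- A's inner 'for col in col_names: if col.lower().endswith("id"): primary_key_tmp = col; break'
def pvFirstId : List String → String
  | [] => ""
  | c :: cs => if PySem.Str.endswith (PySem.Str.lower c) "id" then c else pvFirstId cs

def found_primary_key_foreign_key (table_names : List String) (column_names : List (List String)) : Int × Int :=
  let column_names_flatted := column_names.flatMap (fun cols => cols)
  let column_count := PySem.Dict.counter column_names_flatted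
  -- loop over column_count.items(); math.comb(cnt, 2) = cnt*(cnt-1)//2 (exact here: cnt > 1)
  let fkSt := column_count.items.foldl
    (fun (st : List String × Int) kc =>
      if kc.2 > 1 then (st.1 ++ [kc.1], st.2 + PySem.Int.floordiv (kc.2 * (kc.2 - 1)) 2) else st)
    ([], 0)
  let primary_key := (table_names.zip column_names).foldl
    (fun (acc : List String) pr =>
      let primary_key_tmp := pvFirstId pr.2
      if primary_key_tmp ≠ "" then acc ++ [primary_key_tmp] else acc)
    []
  ((primary_key.length : Int), fkSt.2)

-- ===== PORT B =====
-- B's streaming step: c = seen.get(col, 0); fk += c; seen[col] = c + 1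
def pvStep (st : PySem.Dict String Int × Int) (col : String) : PySem.Dict String Int × Int :=
  let c := st.1.getD col 0
  (st.1.insert col (c + 1), st.2 + c)

def found_primary_key_foreign_key_alt (table_names : List String) (column_names : List (List String)) : Int × Int :=
  let st := column_names.foldl (fun st cols => cols.foldl pvStep st) (PySem.Dict.empty, 0)
  let primary_key_num :=
    ((table_names.zip column_names).countP
      (fun pr => pr.2.any (fun col => PySem.Str.endswith (PySem.Str.lower col) "id")) : Int)
  (primary_key_num, st.2)

-- ===== PRECONDITION & SPEC =====
def Spec_found_primary_key_foreign_key (table_names : List String) (column_names : List (List String)) (out : Int × Int) : Prop := out = found_primary_key_foreign_key_alt table_names column_names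
instance (table_names : List String) (column_names : List (List String)) (out : Int × Int) : Decidable (Spec_found_primary_key_foreign_key table_names column_names out) := by unfold Spec_found_primary_key_foreign_key; infer_instance

-- ===== CLAIM (what is proved, stated in full; the proofs are below) =====
def Claim_equal_found_primary_key_foreign_key : Prop := ∀ (table_names : List String) (column_names : List (List String)), Dom_found_primary_key_foreign_key table_names column_names → Spec_found_primary_key_foreign_key table_names column_names (found_primary_key_foreign_key table_names column_names)

-- ===== LEMMAS AND PROOFS =====

-- the value A adds for a column occurring n times: comb(n,2) guarded by n > 1
def pvG (n : Nat) : Int :=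
  if ((n : Int)) > 1 then PySem.Int.floordiv ((n : Int) * ((n : Int) - 1)) 2 else 0

-- A's foreign-key total, written as a sum over the distinct columns
def pvT (l : List String) : Int :=
  ((PySem.Set.ofList l).map (fun k => pvG (List.count k l))).sum

lemma pvG_eq (n : Nat) : pvG n = ((n * (n - 1) / 2 : Nat) : Int) := by
  match n with
  | 0 => decide
  | 1 => decide
  | (m+2) =>
    unfold pvG
    rw [if_pos (by push_cast; omega)]
    have h1 : ((m + 2 : Nat) : Int) - 1 = ((m + 1 : Nat) : Int) := by push_cast; ring
    have h2 : (2:Int) = ((2:Nat):Int) := by norm_num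
    have h3 : m + 2 - 1 = m + 1 := rfl
    rw [h1, ← Nat.cast_mul, h2, PySem.Int.floordiv_natCast, h3]

lemma pvG_succ (n : Nat) : pvG (n + 1) = pvG n + (n : Int) := by
  rw [pvG_eq, pvG_eq, ← Nat.choose_two_right, ← Nat.choose_two_right]
  have h : (n + 1).choose 2 = n + n.choose 2 := by
    rw [Nat.choose_succ_succ', Nat.choose_one_right]
  push_cast [h]
  ring

-- sums over a nodup list whose map functions differ only at one member
lemma pvSum_update (S : List String) (hS : S.Nodup) (x : String) (hx : x ∈ S)
    (f g : String → Int) (h : ∀ k ∈ S, k ≠ x → f k = g k) :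
    (S.map f).sum = (S.map g).sum + (f x - g x) := by
  induction S with
  | nil => cases hx
  | cons k S ih =>
    rcases List.nodup_cons.1 hS with ⟨hk, hS'⟩
    by_cases hkx : k = x
    · subst hkx
      have : S.map f = S.map g := List.map_congr_left (fun a ha => h a (.tail _ ha) (fun e => hk (by rw [← e]; exact ha)))
      simp [this]; ring
    · have hx' : x ∈ S := by cases hx with | head => exact absurd rfl hkx | tail _ h' => exact h'
      have := ih hS' hx' (fun a ha hax => h a (.tail _ ha) hax)
      simp [this, h k (.head _) hkx]; ring

lemma pvT_append (l : List String) (x : String) :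
    pvT (l ++ [x]) = pvT l + (List.count x l : Int) := by
  have hofl : PySem.Set.ofList (l ++ [x]) = PySem.Set.add (PySem.Set.ofList l) x := by
    simp [PySem.Set.ofList, List.foldl_append]
  by_cases hx : x ∈ l
  · have hadd : PySem.Set.add (PySem.Set.ofList l) x = PySem.Set.ofList l := by
      simp [PySem.Set.add, pysem, hx]
    have hc : 1 ≤ List.count x l := List.one_le_count_iff.2 hx
    unfold pvT
    rw [hofl, hadd]
    rw [pvSum_update (PySem.Set.ofList l) (PySem.Set.nodup_ofList l) x
        ((PySem.Set.mem_ofList l x).2 hx)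
        (fun k => pvG (List.count k (l ++ [x]))) (fun k => pvG (List.count k l))
        (fun k _ hkx => by
          show pvG (List.count k (l ++ [x])) = pvG (List.count k l)
          rw [List.count_append, List.count_singleton', if_neg (fun e => hkx e.symm), Nat.add_zero])]
    rw [List.count_append, List.count_singleton', if_pos rfl, pvG_succ]
    ring
  · have hadd : PySem.Set.add (PySem.Set.ofList l) x = PySem.Set.ofList l ++ [x] := by
      simp [PySem.Set.add, pysem, hx]
    have hcx : List.count x l = 0 := List.count_eq_zero.2 hx
    unfold pvT
    rw [hofl, hadd, List.map_append, List.sum_append]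
    have h1 : (PySem.Set.ofList l).map (fun k => pvG (List.count k (l ++ [x]))) =
        (PySem.Set.ofList l).map (fun k => pvG (List.count k l)) := by
      refine List.map_congr_left (fun k hk => ?_)
      have hkl : k ∈ l := (PySem.Set.mem_ofList l k).1 hk
      rw [List.count_append, List.count_singleton', if_neg (fun e => hx (by rw [e]; exact hkl)), Nat.add_zero]
    rw [h1]
    simp [List.count_append, hcx, pvG]

-- A's items loop: the Int component ignores the foreign_keys list component
lemma pvFkA_proj (items : List (String × Int)) (st : List String × Int) :
    (items.foldl
      (fun (st : List String × Int) kc =>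
        if kc.2 > 1 then (st.1 ++ [kc.1], st.2 + PySem.Int.floordiv (kc.2 * (kc.2 - 1)) 2) else st)
      st).2 =
    items.foldl (fun a kc => if kc.2 > 1 then a + PySem.Int.floordiv (kc.2 * (kc.2 - 1)) 2 else a) st.2 := by
  induction items generalizing st with
  | nil => rfl
  | cons kc items ih => simp only [List.foldl_cons]; split_ifs <;> exact ih _

lemma pvFoldl_if_add (items : List (String × Int)) (a : Int) :
    items.foldl (fun a kc => if kc.2 > 1 then a + PySem.Int.floordiv (kc.2 * (kc.2 - 1)) 2 else a) a =
    a + (items.map (fun kc => if kc.2 > 1 then PySem.Int.floordiv (kc.2 * (kc.2 - 1)) 2 else (0:Int))).sum := by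
  induction items generalizing a with
  | nil => simp
  | cons kc items ih =>
    simp only [List.foldl_cons, List.map_cons, List.sum_cons]
    split_ifs <;> rw [ih] <;> ring

lemma pvFkA_eq (l : List String) :
    (((PySem.Dict.counter l).items).foldl
      (fun (st : List String × Int) kc =>
        if kc.2 > 1 then (st.1 ++ [kc.1], st.2 + PySem.Int.floordiv (kc.2 * (kc.2 - 1)) 2) else st)
      ([], 0)).2 = pvT l := by
  rw [pvFkA_proj, PySem.Dict.items_counter, pvFoldl_if_add]
  simp only [List.map_map, Int.zero_add]
  rfl

-- B's streaming loop: the dict component is the running counter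
lemma pvStep_proj1 (cols : List String) (d : PySem.Dict String Int) (a : Int) :
    (cols.foldl pvStep (d, a)).1 = cols.foldl (fun d x => d.insert x (d.getD x 0 + 1)) d := by
  induction cols generalizing d a with
  | nil => rfl
  | cons c cols ih => simp only [List.foldl_cons, pvStep]; exact ih _ _

lemma pvNested_eq_flat (cn : List (List String)) (st : PySem.Dict String Int × Int) :
    cn.foldl (fun st cols => cols.foldl pvStep st) st = (cn.flatMap (fun cols => cols)).foldl pvStep st := by
  induction cn generalizing st with
  | nil => rfl
  | cons cols cn ih => simp only [List.foldl_cons, List.flatMap_cons, List.foldl_append]; exact ih _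

lemma pvStream_eq (l : List String) :
    (l.foldl pvStep (PySem.Dict.empty, 0)).2 = pvT l := by
  induction l using List.reverseRecOn with
  | nil => rfl
  | append_singleton l x ih =>
    rw [List.foldl_append, List.foldl_cons, List.foldl_nil]
    have h1 : (l.foldl pvStep (PySem.Dict.empty, 0)).1 = PySem.Dict.counter l := by
      rw [pvStep_proj1, PySem.Dict.foldl_insert_getD_add_one_eq_counter]
    simp only [pvStep, h1, PySem.Dict.getD_counter, ih, pvT_append]

-- primary keys: the break-loop finds a non-empty column iff some column matches
lemma pvFirstId_ne_iff (cols : List String) :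
    (pvFirstId cols ≠ "") ↔ cols.any (fun col => PySem.Str.endswith (PySem.Str.lower col) "id") = true := by
  induction cols with
  | nil => simp [pvFirstId]
  | cons c cs ih =>
    simp only [pvFirstId, List.any_cons]
    by_cases hc : PySem.Str.endswith (PySem.Str.lower c) "id" = true
    · rw [if_pos hc, hc]
      simp only [Bool.true_or, iff_true]
      intro he
      rw [he] at hc
      exact absurd hc (by decide)
    · rw [if_neg hc, Bool.eq_false_iff.2 hc]
      simpa using ih

lemma pvPk_fold (L : List (String × List String)) (acc : List String) :
    ((L.foldl
      (fun (acc : List String) pr =>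
        let primary_key_tmp := pvFirstId pr.2
        if primary_key_tmp ≠ "" then acc ++ [primary_key_tmp] else acc)
      acc).length : Int) =
    (acc.length : Int) +
      (L.countP (fun pr => pr.2.any (fun col => PySem.Str.endswith (PySem.Str.lower col) "id")) : Int) := by
  induction L generalizing acc with
  | nil => simp
  | cons pr L ih =>
    simp only [List.foldl_cons, List.countP_cons]
    by_cases h : pvFirstId pr.2 ≠ ""
    · rw [if_pos h, ih]
      rw [(pvFirstId_ne_iff pr.2).1 h]
      push_cast
      simp
      ring
    · rw [if_neg h, ih]
      have : pr.2.any (fun col => PySem.Str.endswith (PySem.Str.lower col) "id") = false := by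
        rw [← Bool.not_eq_true, ← pvFirstId_ne_iff]
        simpa using h
      rw [this]
      simp

-- ===== VERDICT (by name: the statement is the Claim_ definition above) =====
theorem found_primary_key_foreign_key_spec : Claim_equal_found_primary_key_foreign_key := by
  intro tn cn _
  show _ = _
  unfold found_primary_key_foreign_key found_primary_key_foreign_key_alt
  simp only
  rw [pvNested_eq_flat, pvStream_eq, pvFkA_eq, pvPk_fold]
  simp
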